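-- pv_equiv track=rewrite | github.com/GabrielScholl/Exercicios-Programa | ep2_Space_Invaders.py | moveLasersCanhao
-- ===== SOURCE A (Python) =====
-- def moveLasersCanhao(matriz):
--     ''' (matriz) -> [int, int]
--
--           Recebe a matriz do jogo e move todos os lasers atirados pelo jogador
--           (caracter definido em LASER_CANHAO) uma posição para cima na matriz.
--           Ao mover tem que observar: se saiu do limite da matriz, se atingiu
--           alguma nave e se atingiu algum laser de alguma nave. Em todos esses 3
--           casos o laser movido tem que sumir da matriz. Nos dois primeiros
--           casos tem que atualizar a quantidade de naves atingidas e de lasers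
--           atingidos pois a função retorna esses dois valores numa lista.
--
--           Retorna:
--
--           [quantidade de naves atingidas, quantidade de lasers atingidos]'''
--
--     LASER_CANHAO = '^'
--     NAVE = 'V'
--     EXPLOSAO = '*'
--     LASER_NAVE = '.'
--
--
--     navesAtingidas = 0
--     lasersAtingidos = 0
--
--     #Percorre a matriz, acha lasers
--     for linha in range(len(matriz)):
--         for coluna in range(len(matriz[0])):
--             if matriz[linha][coluna] == LASER_CANHAO:
--
--                 #Escolhe o que imprimir na matriz
--
--                 if linha == 0:
--                     matriz[linha][coluna] = ' '
--                     navesAtingidas += 0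
--
--                 elif matriz[linha-1][coluna] == NAVE:
--                     matriz[linha][coluna] = ' '
--                     matriz[linha-1][coluna] = EXPLOSAO
--                     navesAtingidas += 1
--
--                 elif matriz[linha-1][coluna] == LASER_NAVE:
--                     matriz[linha][coluna] = ' '
--                     matriz[linha-1][coluna] = EXPLOSAO
--                     lasersAtingidos += 1
--
--                 else:
--                     matriz[linha][coluna] = ' '
--                     matriz[linha-1][coluna] = LASER_CANHAO
--
--     return [navesAtingidas, lasersAtingidos]
-- ===== SOURCE B (Python) =====
-- def moveLasersCanhao(matriz):
--     '''[naves atingidas, lasers atingidos] — pure count over adjacent row pairs;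
--     does NOT mutate matriz (A moves the lasers in place; equivalence is about
--     the return value only).'''
--     largura = len(matriz[0]) if matriz else 0
--     pares = [(a, b)
--              for acima, abaixo in zip(matriz, matriz[1:])
--              for a, b in zip(acima[:largura], abaixo[:largura])]
--     naves = sum(1 for a, b in pares if b == '^' and a == 'V')
--     lasers = sum(1 for a, b in pares if b == '^' and a == '.')
--     return [naves, lasers]
-- ===== Notes on version B (the rewrite author's own statement) =====
-- stated objective: simpler
-- what changed: Replaces A's in-place grid simulation (scan rows top-down, mutate cells, cascade of branches) by a pure one-shot count over vertically adjacent cell pairs (below=='^' with above=='V'/'.'); B does not mutate matriz, equivalence is about the return value only.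
import Mathlib
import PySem

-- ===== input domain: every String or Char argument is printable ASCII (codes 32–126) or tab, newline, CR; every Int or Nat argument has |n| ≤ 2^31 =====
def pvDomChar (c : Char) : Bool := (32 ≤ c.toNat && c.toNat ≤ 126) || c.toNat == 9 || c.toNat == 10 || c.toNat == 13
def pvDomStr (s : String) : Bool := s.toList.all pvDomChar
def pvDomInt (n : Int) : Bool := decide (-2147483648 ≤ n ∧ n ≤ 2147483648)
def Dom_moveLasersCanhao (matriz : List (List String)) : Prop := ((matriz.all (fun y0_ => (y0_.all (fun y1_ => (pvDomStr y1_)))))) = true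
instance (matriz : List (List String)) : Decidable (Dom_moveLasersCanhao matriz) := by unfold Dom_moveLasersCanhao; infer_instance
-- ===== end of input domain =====

-- B replaces A's in-place grid simulation by a pure count over vertically adjacent
-- cell pairs; A mutates matriz in place, B does not — the equivalence proved here is
-- about the RETURN value only.

-- ===== PORT A =====
-- matriz[i][j] read (in range under Pre_; getD is exact there)
def pvCell (m : List (List String)) (i c : Nat) : String := (m.getD i []).getD c ""
-- matriz[i][j] = v (in range under Pre_)
def pvSet (m : List (List String)) (i c : Nat) (v : String) : List (List String) :=
  m.set i ((m.getD i []).set c v)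

-- body of the inner 'for coluna' loop of A
def pvColStep (linha : Nat) (st : List (List String) × Int × Int) (coluna : Nat) :
    List (List String) × Int × Int :=
  if pvCell st.1 linha coluna == "^" then
    if linha == 0 then (pvSet st.1 linha coluna " ", st.2.1 + 0, st.2.2)
    else if pvCell st.1 (linha - 1) coluna == "V" then
      (pvSet (pvSet st.1 linha coluna " ") (linha - 1) coluna "*", st.2.1 + 1, st.2.2)
    else if pvCell st.1 (linha - 1) coluna == "." then
      (pvSet (pvSet st.1 linha coluna " ") (linha - 1) coluna "*", st.2.1, st.2.2 + 1)
    else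
      (pvSet (pvSet st.1 linha coluna " ") (linha - 1) coluna "^", st.2.1, st.2.2)
  else st

-- body of the outer 'for linha' loop of A
def pvRowStep (w : Nat) (st : List (List String) × Int × Int) (linha : Nat) :
    List (List String) × Int × Int :=
  (List.range w).foldl (pvColStep linha) st

def moveLasersCanhao (matriz : List (List String)) : List Int :=
  let fin := (List.range matriz.length).foldl (pvRowStep (matriz.headD []).length) (matriz, 0, 0)
  [fin.2.1, fin.2.2]

-- ===== PORT B =====
-- [(a, b) for acima, abaixo in zip(matriz, matriz[1:]) for a, b in zip(acima[:w], abaixo[:w])]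
def pvPairs (matriz : List (List String)) (w : Nat) : List (String × String) :=
  (matriz.zip (matriz.drop 1)).flatMap (fun p => (p.1.take w).zip (p.2.take w))

def moveLasersCanhao_alt (matriz : List (List String)) : List Int :=
  let largura := (matriz.headD []).length
  let pares := pvPairs matriz largura
  let naves : Int := ((pares.filter (fun q => q.2 == "^" && q.1 == "V")).length : Int)
  let lasers : Int := ((pares.filter (fun q => q.2 == "^" && q.1 == ".")).length : Int)
  [naves, lasers]

-- ===== PRECONDITION & SPEC =====
-- A raises IndexError exactly when some row is shorter than row 0 (every row is
-- indexed at all columns of row 0); Pre_ excludes exactly those grids.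
def Pre_moveLasersCanhao (matriz : List (List String)) : Prop :=
  ∀ row ∈ matriz, (matriz.headD []).length ≤ row.length
instance (matriz : List (List String)) : Decidable (Pre_moveLasersCanhao matriz) := by
  unfold Pre_moveLasersCanhao; infer_instance

def pvWitness_moveLasersCanhao : List (List String) := [["V", "."], ["^", "^"]]

def Spec_moveLasersCanhao (matriz : List (List String)) (out : List Int) : Prop :=
  out = moveLasersCanhao_alt matriz
instance (matriz : List (List String)) (out : List Int) : Decidable (Spec_moveLasersCanhao matriz out) := by
  unfold Spec_moveLasersCanhao; infer_instance

-- ===== CLAIM (what is proved, stated in full; the proofs are below) =====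
def Claim_equal_moveLasersCanhao : Prop :=
  ∀ (matriz : List (List String)), Dom_moveLasersCanhao matriz →
    Pre_moveLasersCanhao matriz → Spec_moveLasersCanhao matriz (moveLasersCanhao matriz)

-- ===== LEMMAS AND PROOFS =====

-- the value a cell holds after its own row was processed: a cannon laser left a blank
def pvEff (x : String) : String := if x == "^" then " " else x

lemma pvEff_beq_V (x : String) : (pvEff x == "V") = (x == "V") := by
  unfold pvEff; by_cases h : x == "^"
  · rw [eq_of_beq h]; simp
  · simp [h]

lemma pvEff_beq_dot (x : String) : (pvEff x == ".") = (x == ".") := by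
  unfold pvEff; by_cases h : x == "^"
  · rw [eq_of_beq h]; simp
  · simp [h]

lemma pvSet_length (m : List (List String)) (i c : Nat) (v : String) :
    (pvSet m i c v).length = m.length := by
  simp [pvSet]

lemma pvSet_rowlen (m : List (List String)) (i c : Nat) (v : String) (i' : Nat) :
    ((pvSet m i c v).getD i' []).length = (m.getD i' []).length := by
  unfold pvSet
  by_cases hlen : i < m.length
  · by_cases h : i' = i
    · subst h; simp [List.getD, List.getElem?_set_self hlen]
    · simp [List.getD, List.getElem?_set_ne (fun he => h he.symm)]
  · rw [List.set_eq_of_length_le (by omega)]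

lemma pvCell_pvSet_self (m : List (List String)) (i c : Nat) (v : String)
    (hi : i < m.length) (hc : c < (m.getD i []).length) :
    pvCell (pvSet m i c v) i c = v := by
  unfold pvCell pvSet
  simp only [List.getD] at hc ⊢
  rw [List.getElem?_set_self hi, Option.getD_some, List.getElem?_set_self hc, Option.getD_some]

lemma pvCell_pvSet_ne_row (m : List (List String)) (i c : Nat) (v : String)
    (i' c' : Nat) (h : i' ≠ i) :
    pvCell (pvSet m i c v) i' c' = pvCell m i' c' := by
  unfold pvCell pvSet
  simp [List.getD, List.getElem?_set_ne (fun he => h he.symm)]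

lemma pvCell_pvSet_ne_col (m : List (List String)) (i c : Nat) (v : String)
    (c' : Nat) (h : c' ≠ c) :
    pvCell (pvSet m i c v) i c' = pvCell m i c' := by
  unfold pvCell pvSet
  by_cases hlen : i < m.length
  · simp [List.getD, List.getElem?_set_self hlen, List.getElem?_set_ne (fun he => h he.symm)]
  · rw [List.set_eq_of_length_le (by omega)]

lemma pvRowlen (M : List (List String)) (hP : Pre_moveLasersCanhao M) (i : Nat)
    (hi : i < M.length) : (M.headD []).length ≤ (M.getD i []).length := by
  refine hP _ ?_
  rw [List.getD_eq_getElem M [] hi]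
  exact List.getElem_mem hi

lemma pvAdj_take_succ (M : List (List String)) (r : Nat) (h1 : 1 ≤ r) (h : r < M.length) :
    (M.take (r+1)).zip ((M.take (r+1)).drop 1) =
    (M.take r).zip ((M.take r).drop 1) ++ [(M.getD (r-1) [], M.getD r [])] := by
  apply List.ext_getElem
  · simp; omega
  · intro i hi1 hi2
    simp at hi1 hi2
    simp [List.getElem_zip, List.getElem_append, List.getElem_take]
    intro hcase
    have hir : i = r - 1 := by omega
    subst hir
    simp [List.getElem?_eq_getElem (show r-1 < M.length by omega),
      List.getElem?_eq_getElem h]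
    congr 1
    omega

lemma pvZip_take_eq_map_range (a b : List String) (w : Nat) (ha : w ≤ a.length)
    (hb : w ≤ b.length) :
    (a.take w).zip (b.take w) = (List.range w).map (fun c => (a.getD c "", b.getD c "")) := by
  apply List.ext_getElem
  · simp; omega
  · intro i hi1 hi2
    simp at hi1 hi2
    simp [List.getElem_zip, List.getElem_take, List.getD,
      List.getElem?_eq_getElem (show i < a.length by omega),
      List.getElem?_eq_getElem (show i < b.length by omega)]

lemma pvPairs_take_succ (M : List (List String)) (w r : Nat) (h : r < M.length) :
    pvPairs (M.take (r+1)) w =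
    pvPairs (M.take r) w ++
      (if 1 ≤ r then ((M.getD (r-1) []).take w).zip ((M.getD r []).take w) else []) := by
  by_cases h1 : 1 ≤ r
  · unfold pvPairs
    rw [pvAdj_take_succ M r h1 h, List.flatMap_append]
    simp [h1]
  · have hr0 : r = 0 := by omega
    subst hr0
    simp [pvPairs]

-- processing row 0: every '^' of row 0 becomes ' ', nothing else changes, no counts
lemma pvRow0 (m : List (List String)) (nv ls : Int) (w : Nat)
    (h0 : 0 < m.length) (hw : w ≤ (m.getD 0 []).length) :
    ∀ c, c ≤ w → ∀ st, st = (List.range c).foldl (pvColStep 0) (m, nv, ls) →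
    st.2.1 = nv ∧ st.2.2 = ls ∧
    st.1.length = m.length ∧
    (∀ i, (st.1.getD i []).length = (m.getD i []).length) ∧
    (∀ i c', i ≠ 0 → pvCell st.1 i c' = pvCell m i c') ∧
    (∀ c', c ≤ c' → pvCell st.1 0 c' = pvCell m 0 c') ∧
    (∀ c', c' < c → pvCell st.1 0 c' = pvEff (pvCell m 0 c')) := by
  intro c
  induction c with
  | zero =>
    intro _ st hst
    subst hst
    simp [pvCell]
  | succ c ih =>
    intro hc st hst
    rw [List.range_succ, List.foldl_append] at hst
    obtain ⟨i1, i2, i3, i4, i5, i6, i7⟩ := ih (by omega) _ rfl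
    set st' := (List.range c).foldl (pvColStep 0) (m, nv, ls) with hst'
    have hread : pvCell st'.1 0 c = pvCell m 0 c := i6 c (le_refl c)
    have hlen0 : 0 < st'.1.length := by omega
    have hlenr : c < (st'.1.getD 0 []).length := by rw [i4]; omega
    by_cases hhat : pvCell st'.1 0 c == "^"
    · have hstep : st = (pvSet st'.1 0 c " ", st'.2.1 + 0, st'.2.2) := by
        rw [hst]; simp [pvColStep, hhat]
      subst hstep
      refine ⟨by simpa using i1, i2, by rw [pvSet_length]; exact i3,
        fun i => by rw [pvSet_rowlen]; exact i4 i,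
        fun i c' hi => by rw [pvCell_pvSet_ne_row _ _ _ _ _ _ hi]; exact i5 i c' hi,
        fun c' hc' => by rw [pvCell_pvSet_ne_col _ _ _ _ _ (by omega)]; exact i6 c' (by omega),
        fun c' hc' => ?_⟩
      by_cases hcc : c' = c
      · subst hcc
        rw [pvCell_pvSet_self _ _ _ _ hlen0 hlenr, ← hread, pvEff, if_pos hhat]
      · rw [pvCell_pvSet_ne_col _ _ _ _ _ hcc]
        exact i7 c' (by omega)
    · have hstep : st = st' := by rw [hst]; simp [pvColStep, hhat]
      subst hstep
      refine ⟨i1, i2, i3, i4, i5, fun c' hc' => i6 c' (by omega), fun c' hc' => ?_⟩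
      by_cases hcc : c' = c
      · subst hcc
        rw [hread, pvEff, if_neg (by rw [← hread]; exact hhat)]
      · exact i7 c' (by omega)

-- processing row r ≥ 1: row r's '^' become ' ', rows other than r, r-1 are untouched,
-- and the counters advance by the number of (row r-1, row r) = ('V'/'.', '^') columns
lemma pvRowS (m : List (List String)) (nv ls : Int) (w r : Nat)
    (h1 : 1 ≤ r) (hr : r < m.length)
    (hwr : w ≤ (m.getD r []).length) (hwr1 : w ≤ (m.getD (r-1) []).length) :
    ∀ c, c ≤ w → ∀ st, st = (List.range c).foldl (pvColStep r) (m, nv, ls) →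
    st.1.length = m.length ∧
    (∀ i, (st.1.getD i []).length = (m.getD i []).length) ∧
    (∀ i c', i ≠ r → i ≠ r - 1 → pvCell st.1 i c' = pvCell m i c') ∧
    (∀ c', c ≤ c' → pvCell st.1 r c' = pvCell m r c') ∧
    (∀ c', c ≤ c' → pvCell st.1 (r-1) c' = pvCell m (r-1) c') ∧
    (∀ c', c' < c → pvCell st.1 r c' = pvEff (pvCell m r c')) ∧
    st.2.1 = nv + (((List.range c).filter
      (fun c' => (pvCell m r c' == "^") && (pvCell m (r-1) c' == "V"))).length : Int) ∧
    st.2.2 = ls + (((List.range c).filter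
      (fun c' => (pvCell m r c' == "^") && (pvCell m (r-1) c' == "."))).length : Int) := by
  intro c
  induction c with
  | zero =>
    intro _ st hst
    subst hst
    simp [pvCell]
  | succ c ih =>
    intro hc st hst
    rw [List.range_succ, List.foldl_append] at hst
    obtain ⟨i1, i2, i3, i4, i5, i6, i7, i8⟩ := ih (by omega) _ rfl
    set st' := (List.range c).foldl (pvColStep r) (m, nv, ls) with hst'
    have hrne : r ≠ 0 := by omega
    have hrne' : r - 1 ≠ r := by omega
    have hread : pvCell st'.1 r c = pvCell m r c := i4 c (le_refl c)
    have hreadUp : pvCell st'.1 (r-1) c = pvCell m (r-1) c := i5 c (le_refl c)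
    have hlenr : r < st'.1.length := by omega
    have hlenr1 : r - 1 < st'.1.length := by omega
    have hrowr : c < (st'.1.getD r []).length := by rw [i2]; omega
    have hrowr1 : c < (st'.1.getD (r-1) []).length := by rw [i2]; omega
    have hcount : ∀ (x : Int) (p : Nat → Bool),
        x + (((List.range (c+1)).filter p).length : Int)
        = x + (((List.range c).filter p).length : Int) + (if p c then 1 else 0) := by
      intro x p
      rw [List.range_succ, List.filter_append]
      by_cases hp : p c
      · simp [hp]
        ring
      · simp [hp]
    -- common facts after the double pvSet m2 = pvSet (pvSet st'.1 r c " ") (r-1) c v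
    by_cases hhat : pvCell st'.1 r c == "^"
    · have hrowr' : c < ((pvSet st'.1 r c " ").getD (r-1) []).length := by
        rw [pvSet_rowlen]; exact hrowr1
      have hlenr1' : r - 1 < (pvSet st'.1 r c " ").length := by rw [pvSet_length]; exact hlenr1
      have hmid : ∀ v : String,
          let m2 := pvSet (pvSet st'.1 r c " ") (r-1) c v
          m2.length = m.length ∧
          (∀ i, (m2.getD i []).length = (m.getD i []).length) ∧
          (∀ i c', i ≠ r → i ≠ r - 1 → pvCell m2 i c' = pvCell m i c') ∧
          (∀ c', c + 1 ≤ c' → pvCell m2 r c' = pvCell m r c') ∧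
          (∀ c', c + 1 ≤ c' → pvCell m2 (r-1) c' = pvCell m (r-1) c') ∧
          (∀ c', c' < c + 1 → pvCell m2 r c' = pvEff (pvCell m r c')) := by
        intro v m2
        refine ⟨by rw [pvSet_length, pvSet_length]; exact i1,
          fun i => by rw [pvSet_rowlen, pvSet_rowlen]; exact i2 i,
          fun i c' hir hir1 => by
            rw [pvCell_pvSet_ne_row _ _ _ _ _ _ hir1, pvCell_pvSet_ne_row _ _ _ _ _ _ hir]
            exact i3 i c' hir hir1,
          fun c' hc' => by
            rw [pvCell_pvSet_ne_row _ _ _ _ _ _ (by omega : r ≠ r - 1),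
              pvCell_pvSet_ne_col _ _ _ _ _ (by omega)]
            exact i4 c' (by omega),
          fun c' hc' => by
            rw [pvCell_pvSet_ne_col _ _ _ _ _ (by omega),
              pvCell_pvSet_ne_row _ _ _ _ _ _ hrne']
            exact i5 c' (by omega),
          fun c' hc' => ?_⟩
        rw [pvCell_pvSet_ne_row _ _ _ _ _ _ (by omega : r ≠ r - 1)]
        by_cases hcc : c' = c
        · subst hcc
          rw [pvCell_pvSet_self _ _ _ _ hlenr hrowr, ← hread, pvEff, if_pos hhat]
        · rw [pvCell_pvSet_ne_col _ _ _ _ _ hcc]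
          exact i6 c' (by omega)
      by_cases hV : pvCell st'.1 (r-1) c == "V"
      · have hstep : st = (pvSet (pvSet st'.1 r c " ") (r-1) c "*", st'.2.1 + 1, st'.2.2) := by
          rw [hst]; simp [pvColStep, hhat, hrne, hV]
        obtain ⟨m1, m2c, m3, m4, m5, m6⟩ := hmid "*"
        subst hstep
        refine ⟨m1, m2c, m3, m4, m5, m6, ?_, ?_⟩
        · have hb : ((pvCell m r c == "^") && (pvCell m (r-1) c == "V")) = true := by
            rw [← hread, ← hreadUp]; simp [hhat, hV]
          rw [hcount nv _, ← i7]
          simp [hb]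
        · have hVeq : pvCell m (r-1) c = "V" := by rw [← hreadUp]; exact eq_of_beq hV
          have hb : ((pvCell m r c == "^") && (pvCell m (r-1) c == ".")) = false := by
            simp [hVeq]
          rw [hcount ls _, ← i8]
          simp [hb]
      · by_cases hD : pvCell st'.1 (r-1) c == "."
        · have hstep : st = (pvSet (pvSet st'.1 r c " ") (r-1) c "*", st'.2.1, st'.2.2 + 1) := by
            rw [hst]; simp [pvColStep, hhat, hrne, hV, hD]
          obtain ⟨m1, m2c, m3, m4, m5, m6⟩ := hmid "*"
          subst hstep
          refine ⟨m1, m2c, m3, m4, m5, m6, ?_, ?_⟩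
          · have hb : ((pvCell m r c == "^") && (pvCell m (r-1) c == "V")) = false := by
              rw [← hreadUp]; simp [hV]
            rw [hcount nv _, ← i7]
            simp [hb]
          · have hb : ((pvCell m r c == "^") && (pvCell m (r-1) c == ".")) = true := by
              rw [← hread, ← hreadUp]; simp [hhat, hD]
            rw [hcount ls _, ← i8]
            simp [hb]
        · have hstep : st = (pvSet (pvSet st'.1 r c " ") (r-1) c "^", st'.2.1, st'.2.2) := by
            rw [hst]; simp [pvColStep, hhat, hrne, hV, hD]
          obtain ⟨m1, m2c, m3, m4, m5, m6⟩ := hmid "^"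
          subst hstep
          refine ⟨m1, m2c, m3, m4, m5, m6, ?_, ?_⟩
          · have hb : ((pvCell m r c == "^") && (pvCell m (r-1) c == "V")) = false := by
              rw [← hreadUp]; simp [hV]
            rw [hcount nv _, ← i7]
            simp [hb]
          · have hb : ((pvCell m r c == "^") && (pvCell m (r-1) c == ".")) = false := by
              rw [← hreadUp]; simp [hD]
            rw [hcount ls _, ← i8]
            simp [hb]
    · have hstep : st = st' := by rw [hst]; simp [pvColStep, hhat]
      subst hstep
      have hfalse : ∀ t : String,
          ((pvCell m r c == "^") && (pvCell m (r-1) c == t)) = false := by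
        intro t
        rw [← hread]
        simp [hhat]
      refine ⟨i1, i2, i3, fun c' hc' => i4 c' (by omega), fun c' hc' => i5 c' (by omega),
        fun c' hc' => ?_, ?_, ?_⟩
      · by_cases hcc : c' = c
        · subst hcc
          rw [hread, pvEff, if_neg (by rw [← hread]; exact hhat)]
        · exact i6 c' (by omega)
      · rw [hcount nv _, ← i7]
        simp [hfalse "V"]
      · rw [hcount ls _, ← i8]
        simp [hfalse "."]

-- outer loop invariant: after processing rows 0..r-1, rows ≥ r are untouched, row r-1
-- holds its post-row values, and the counters equal B's counts over the first r rows
lemma pvOuter (M : List (List String)) (hP : Pre_moveLasersCanhao M) (r : Nat) :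
    r ≤ M.length →
    ∀ st, st = (List.range r).foldl (pvRowStep (M.headD []).length) (M, 0, 0) →
    st.1.length = M.length ∧
    (∀ i, (st.1.getD i []).length = (M.getD i []).length) ∧
    (∀ i c, r ≤ i → pvCell st.1 i c = pvCell M i c) ∧
    (∀ c, c < (M.headD []).length → 1 ≤ r → pvCell st.1 (r-1) c = pvEff (pvCell M (r-1) c)) ∧
    st.2.1 = (((pvPairs (M.take r) (M.headD []).length).filter
      (fun q => q.2 == "^" && q.1 == "V")).length : Int) ∧
    st.2.2 = (((pvPairs (M.take r) (M.headD []).length).filter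
      (fun q => q.2 == "^" && q.1 == ".")).length : Int) := by
  set w := (M.headD []).length with hw
  induction r with
  | zero =>
    intro _ st hst
    subst hst
    simp [pvPairs]
  | succ r ih =>
    intro hr1 st hst
    rw [List.range_succ, List.foldl_append] at hst
    obtain ⟨i1, i2, i3, i4, i5, i6⟩ := ih (by omega) _ rfl
    set st' := (List.range r).foldl (pvRowStep w) (M, 0, 0) with hst'
    have hrM : r < M.length := by omega
    have hst'eta : st' = (st'.1, st'.2.1, st'.2.2) := rfl
    have hstep : st = (List.range w).foldl (pvColStep r) (st'.1, st'.2.1, st'.2.2) := by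
      rw [hst]; rfl
    have hwr : w ≤ (st'.1.getD r []).length := by rw [i2]; exact pvRowlen M hP r hrM
    by_cases h1 : 1 ≤ r
    · have hwr1 : w ≤ (st'.1.getD (r-1) []).length := by
        rw [i2]; exact pvRowlen M hP (r-1) (by omega)
      obtain ⟨j1, j2, j3, j4, j5, j6, j7, j8⟩ :=
        pvRowS st'.1 st'.2.1 st'.2.2 w r h1 (by omega) hwr hwr1 w (le_refl w) st hstep
      have hrowr : ∀ c, pvCell st'.1 r c = pvCell M r c := fun c => i3 r c (le_refl r)
      have hfilter : ∀ t : String,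
          (List.range w).filter
            (fun c' => (pvCell st'.1 r c' == "^") && (pvCell st'.1 (r-1) c' == t))
          = (List.range w).filter
            (fun c' => (pvCell M r c' == "^") && (pvEff (pvCell M (r-1) c') == t)) := by
        intro t
        refine List.filter_congr (fun c hc => ?_)
        rw [List.mem_range] at hc
        rw [hrowr c, i4 c hc h1]
      have htake : ∀ t : String,
          (((pvPairs (M.take (r+1)) w).filter (fun q => q.2 == "^" && q.1 == t)).length : Int)
          = (((pvPairs (M.take r) w).filter (fun q => q.2 == "^" && q.1 == t)).length : Int)
            + (((List.range w).filter
               (fun c' => (pvCell M r c' == "^") && (pvCell M (r-1) c' == t))).length : Int) := by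
        intro t
        rw [pvPairs_take_succ M w r hrM, if_pos h1, List.filter_append, List.length_append,
          pvZip_take_eq_map_range _ _ w (pvRowlen M hP (r-1) (by omega)) (pvRowlen M hP r hrM),
          List.filter_map, List.length_map]
        push_cast
        rfl
      refine ⟨by rw [j1]; exact i1, fun i => by rw [j2 i]; exact i2 i,
        fun i c hi => by
          rw [j3 i c (by omega) (by omega)]; exact i3 i c (by omega),
        fun c hc _ => by
          simpa using by rw [j6 c hc]; rw [hrowr c],
        ?_, ?_⟩
      · rw [j7, i5, htake "V", hfilter "V"]
        have he : (List.range w).filter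
            (fun c' => (pvCell M r c' == "^") && (pvEff (pvCell M (r-1) c') == "V"))
            = (List.range w).filter
            (fun c' => (pvCell M r c' == "^") && (pvCell M (r-1) c' == "V")) :=
          List.filter_congr (fun c _ => by rw [pvEff_beq_V])
        rw [he]
      · rw [j8, i6, htake ".", hfilter "."]
        have he : (List.range w).filter
            (fun c' => (pvCell M r c' == "^") && (pvEff (pvCell M (r-1) c') == "."))
            = (List.range w).filter
            (fun c' => (pvCell M r c' == "^") && (pvCell M (r-1) c' == ".")) :=
          List.filter_congr (fun c _ => by rw [pvEff_beq_dot])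
        rw [he]
    · have hr0 : r = 0 := by omega
      subst hr0
      obtain ⟨j1, j2, j3, j4, j5, j6, j7⟩ :=
        pvRow0 st'.1 st'.2.1 st'.2.2 w (by omega) hwr w (le_refl w) st hstep
      have hst'0 : st' = (M, (0 : Int), (0 : Int)) := by rw [hst']; simp
      have htake1 : pvPairs (M.take 1) w = [] := by
        rw [show (1 : Nat) = 0 + 1 from rfl, pvPairs_take_succ M w 0 (by omega)]
        simp [pvPairs]
      refine ⟨by rw [j3]; exact i1, fun i => by rw [j4 i]; exact i2 i,
        fun i c hi => by
          rw [j5 i c (by omega)]; exact i3 i c (by omega),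
        fun c hc _ => by
          simpa using by rw [j7 c hc]; rw [i3 0 c (le_refl 0)],
        by rw [j1, hst'0, htake1]; simp,
        by rw [j2, hst'0, htake1]; simp⟩

-- ===== VERDICT (by name: the statement is the Claim_ definition above) =====
theorem moveLasersCanhao_spec : Claim_equal_moveLasersCanhao := by
  intro matriz _ hP
  unfold Spec_moveLasersCanhao moveLasersCanhao moveLasersCanhao_alt
  obtain ⟨_, _, _, _, h5, h6⟩ :=
    pvOuter matriz hP matriz.length (le_refl _) _ rfl
  simp only []
  rw [h5, h6, List.take_length]
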